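-- pv_equiv track=rewrite | github.com/ankitshah009/leetcode_python | graphs/1806-minimum_number_of_operations_to_reinitialize_a_permutation.py | reinitializePermutation
-- ===== SOURCE A (Python) =====
-- def reinitializePermutation(n: int) -> int:
--     """
--     Track position 1 (or any position except 0 and n-1).
--     Position 0 and n-1 are fixed.
--     """
--     # Position i goes to:
--     # - 2*i if i < n/2
--     # - 2*i - n + 1 if i >= n/2
--
--     pos = 1
--     ops = 0
--
--     while True:
--         # Apply transformation
--         if pos < n // 2:
--             pos = 2 * pos
--         else:
--             pos = 2 * pos - n + 1
--         ops += 1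
--
--         if pos == 1:
--             break
--
--     return ops
-- ===== SOURCE B (Python) =====
-- def reinitializePermutation(n: int) -> int:
--     # The answer is the multiplicative order of 2 modulo m = n - 1:
--     # compute phi(m) by trial-division factoring, factor phi, and strip from
--     # the exponent every removable prime factor; what remains is the order.
--     m = n - 1
--
--     phi = 1
--     r = m
--     p = 2
--     while p * p <= r:
--         if r % p == 0:
--             pe = 1
--             while r % p == 0:
--                 r //= p
--                 pe *= p
--             phi *= pe - pe // p
--         p += 1
--     if r > 1:
--         phi *= r - 1
--
--     primes = []
--     x = phi
--     q = 2
--     while q * q <= x: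
--         if x % q == 0:
--             primes.append(q)
--             while x % q == 0:
--                 x //= q
--         q += 1
--     if x > 1:
--         primes.append(x)
--
--     e = phi
--     for q in primes:
--         while e % q == 0 and pow(2, e // q, m) == 1:
--             e //= q
--     return e
-- ===== Notes on version B (the rewrite author's own statement) =====
-- stated objective: alternative
-- what changed: B replaces A's step-by-step simulation of the tracked position (one iteration of the permutation map per operation counted) by number theory: it computes Euler's phi of n-1 by trial-division factoring, factors phi, and strips every removable prime factor from that exponent via modular exponentiation, leaving exactly the multiplicative order of 2 mod n-1; intended as asymptotically faster (O(sqrt n) vs O(order), which can approach n), measured only 1.57x at the largest size the harness confirmed.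
import Mathlib
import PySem

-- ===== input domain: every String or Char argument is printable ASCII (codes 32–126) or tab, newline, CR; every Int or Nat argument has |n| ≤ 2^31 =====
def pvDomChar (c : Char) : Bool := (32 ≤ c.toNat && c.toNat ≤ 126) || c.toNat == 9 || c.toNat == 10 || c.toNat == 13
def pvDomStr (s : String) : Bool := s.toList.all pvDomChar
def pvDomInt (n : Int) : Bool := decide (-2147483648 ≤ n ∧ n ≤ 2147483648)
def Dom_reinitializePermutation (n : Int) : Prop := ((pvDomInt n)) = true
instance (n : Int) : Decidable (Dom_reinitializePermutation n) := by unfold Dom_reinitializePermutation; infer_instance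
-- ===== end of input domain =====

-- B replaces A's step-by-step permutation simulation (one loop iteration per counted
-- operation) by number theory: Euler's phi of n-1 via trial-division factoring, then
-- stripping every removable prime factor from that exponent leaves exactly the order.

-- ===== PORT A =====
-- A's `while True` loop, fuel-based; fuel n.toNat suffices on Pre_ (the loop returns within n-2 steps there).
def pvALoop (n : Int) : Nat → Int → Int → Int
  | 0, _, ops => ops
  | fuel + 1, pos, ops =>
      let pos' := if pos < PySem.Int.floordiv n 2 then 2 * pos else 2 * pos - n + 1
      if pos' = 1 then ops + 1 else pvALoop n fuel pos' (ops + 1)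

def reinitializePermutation (n : Int) : Int := pvALoop n n.toNat 1 0

-- ===== PORT B =====
-- inner `while r % p == 0` of the phi loop: strip p from r, accumulating pe
def pvStrip (p : Int) : Nat → Int → Int → Int × Int
  | 0, r, pe => (r, pe)
  | fuel + 1, r, pe =>
      if PySem.Int.mod r p = 0 then pvStrip p fuel (PySem.Int.floordiv r p) (pe * p)
      else (r, pe)

-- B's `while p * p <= r` phi loop; fuel m+1 suffices (p grows past sqrt r within it)
def pvPhiLoop : Nat → Int → Int → Int → Int × Int
  | 0, phi, r, _ => (phi, r)
  | fuel + 1, phi, r, p =>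
      if p * p ≤ r then
        (if PySem.Int.mod r p = 0 then
          let s := pvStrip p r.toNat r 1
          pvPhiLoop fuel (phi * (s.2 - PySem.Int.floordiv s.2 p)) s.1 (p + 1)
        else pvPhiLoop fuel phi r (p + 1))
      else (phi, r)

-- inner `while x % q == 0` of the factor loop
def pvStrip2 (q : Int) : Nat → Int → Int
  | 0, x => x
  | fuel + 1, x =>
      if PySem.Int.mod x q = 0 then pvStrip2 q fuel (PySem.Int.floordiv x q) else x

-- B's `while q * q <= x` trial-division loop collecting prime factors
def pvFactLoop : Nat → List Int → Int → Int → List Int × Int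
  | 0, fs, x, _ => (fs, x)
  | fuel + 1, fs, x, q =>
      if q * q ≤ x then
        (if PySem.Int.mod x q = 0 then
          pvFactLoop fuel (fs ++ [q]) (pvStrip2 q x.toNat x) (q + 1)
        else pvFactLoop fuel fs x (q + 1))
      else (fs, x)

-- inner `while e % q == 0 and pow(2, e // q, m) == 1`; pow(2,k,m) ported as 2^k % m
def pvRedIn (m q : Int) : Nat → Int → Int
  | 0, e => e
  | fuel + 1, e =>
      if PySem.Int.mod e q = 0 ∧ PySem.Int.mod (2 ^ (PySem.Int.floordiv e q).toNat) m = 1 then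
        pvRedIn m q fuel (PySem.Int.floordiv e q)
      else e

def reinitializePermutation_alt (n : Int) : Int :=
  let m := n - 1
  let t := pvPhiLoop (m.toNat + 1) 1 m 2
  let phi := if 1 < t.2 then t.1 * (t.2 - 1) else t.1
  let f := pvFactLoop (phi.toNat + 1) [] phi 2
  let primes := if 1 < f.2 then f.1 ++ [f.2] else f.1
  primes.foldl (fun e q => pvRedIn m q e.toNat e) phi

-- ===== PRECONDITION & SPEC =====
-- A returns exactly on even n ≥ 2; on every other input the Python while-loop never sees pos = 1 again and diverges.
def Pre_reinitializePermutation (n : Int) : Prop := 2 ≤ n ∧ n % 2 = 0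
instance (n : Int) : Decidable (Pre_reinitializePermutation n) := by unfold Pre_reinitializePermutation; infer_instance
def pvWitness_reinitializePermutation : Int := 6

def Spec_reinitializePermutation (n : Int) (out : Int) : Prop := out = reinitializePermutation_alt n
instance (n : Int) (out : Int) : Decidable (Spec_reinitializePermutation n out) := by unfold Spec_reinitializePermutation; infer_instance

-- ===== CLAIM (what is proved, stated in full; the proofs are below) =====
def Claim_equal_reinitializePermutation : Prop := ∀ (n : Int), Dom_reinitializePermutation n → Pre_reinitializePermutation n → Spec_reinitializePermutation n (reinitializePermutation n)

-- ===== LEMMAS AND PROOFS =====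

-- Nat shadows of B's loops (the Int ports compute their casts; proved below)
def pvStripN (p : Nat) : Nat → Nat → Nat → Nat × Nat
  | 0, r, pe => (r, pe)
  | fuel + 1, r, pe => if r % p = 0 then pvStripN p fuel (r / p) (pe * p) else (r, pe)

def pvPhiLoopN : Nat → Nat → Nat → Nat → Nat × Nat
  | 0, phi, r, _ => (phi, r)
  | fuel + 1, phi, r, p =>
      if p * p ≤ r then
        (if r % p = 0 then
          let s := pvStripN p r r 1
          pvPhiLoopN fuel (phi * (s.2 - s.2 / p)) s.1 (p + 1)
        else pvPhiLoopN fuel phi r (p + 1))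
      else (phi, r)

def pvStrip2N (q : Nat) : Nat → Nat → Nat
  | 0, x => x
  | fuel + 1, x => if x % q = 0 then pvStrip2N q fuel (x / q) else x

def pvFactLoopN : Nat → List Nat → Nat → Nat → List Nat × Nat
  | 0, fs, x, _ => (fs, x)
  | fuel + 1, fs, x, q =>
      if q * q ≤ x then
        (if x % q = 0 then pvFactLoopN fuel (fs ++ [q]) (pvStrip2N q x x) (q + 1)
        else pvFactLoopN fuel fs x (q + 1))
      else (fs, x)

def pvRedInN (m q : Nat) : Nat → Nat → Nat
  | 0, e => e
  | fuel + 1, e =>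
      if e % q = 0 ∧ 2 ^ (e / q) % m = 1 then pvRedInN m q fuel (e / q) else e

def pvPhiN (m : Nat) : Nat :=
  let t := pvPhiLoopN (m + 1) 1 m 2
  if 1 < t.2 then t.1 * (t.2 - 1) else t.1

def pvPrimesN (x : Nat) : List Nat :=
  let f := pvFactLoopN (x + 1) [] x 2
  if 1 < f.2 then f.1 ++ [f.2] else f.1

def pvAltN (M : Nat) : Nat :=
  (pvPrimesN (pvPhiN M)).foldl (fun e q => pvRedInN M q e e) (pvPhiN M)

-- ---- lifting: the Int ports compute the casts of the Nat shadows ----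
theorem pvStrip_lift (p : Nat) : ∀ (fuel : Nat) (r pe : Nat),
    pvStrip (↑p) fuel (↑r) (↑pe) = ((↑(pvStripN p fuel r pe).1 : Int), (↑(pvStripN p fuel r pe).2 : Int)) := by
  intro fuel
  induction fuel with
  | zero => intro r pe; rfl
  | succ f ih =>
    intro r pe
    simp only [pvStrip, pvStripN, PySem.Int.mod_natCast, PySem.Int.floordiv_natCast,
      Nat.cast_eq_zero]
    split_ifs with h
    · rw [show ((↑pe * ↑p : Int)) = ((↑(pe * p) : Nat) : Int) by push_cast; ring]
      exact ih (r / p) (pe * p)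
    · rfl
theorem pvPhiLoop_lift : ∀ (fuel : Nat) (phi r p : Nat),
    pvPhiLoop fuel (↑phi) (↑r) (↑p) = ((↑(pvPhiLoopN fuel phi r p).1 : Int), (↑(pvPhiLoopN fuel phi r p).2 : Int)) := by
  intro fuel
  induction fuel with
  | zero => intro phi r p; rfl
  | succ f ih =>
    intro phi r p
    simp only [pvPhiLoop, pvPhiLoopN, PySem.Int.mod_natCast, Nat.cast_eq_zero]
    by_cases h1 : p * p ≤ r
    · rw [if_pos (show ((↑p : Int) * ↑p ≤ ↑r) by exact_mod_cast h1), if_pos h1]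
      split_ifs with h2
      · rw [show ((↑r : Int).toNat) = r from Int.toNat_natCast r,
          show ((1 : Int)) = ((1 : Nat) : Int) by norm_num, pvStrip_lift]
        rw [PySem.Int.floordiv_natCast]
        rw [show ((↑(pvStripN p r r 1).2 - ↑((pvStripN p r r 1).2 / p) : Int))
              = ((↑((pvStripN p r r 1).2 - (pvStripN p r r 1).2 / p) : Nat) : Int) from
            (Nat.cast_sub (Nat.div_le_self _ _)).symm]
        rw [show ((↑phi : Int) * ↑((pvStripN p r r 1).2 - (pvStripN p r r 1).2 / p))
              = ((↑(phi * ((pvStripN p r r 1).2 - (pvStripN p r r 1).2 / p)) : Nat) : Int) by push_cast; ring,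
          show ((↑p : Int) + ((1:Nat):Int)) = ((↑(p + 1) : Nat) : Int) by push_cast; ring]
        exact ih _ _ _
      · rw [show ((↑p : Int) + 1) = ((↑(p + 1) : Nat) : Int) by push_cast; ring]
        exact ih _ _ _
    · rw [if_neg (show ¬((↑p : Int) * ↑p ≤ ↑r) by exact_mod_cast h1), if_neg h1]

theorem pvStrip2_lift (q : Nat) : ∀ (fuel : Nat) (x : Nat),
    pvStrip2 (↑q) fuel (↑x) = (↑(pvStrip2N q fuel x) : Int) := by
  intro fuel
  induction fuel with
  | zero => intro x; rfl
  | succ f ih =>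
    intro x
    simp only [pvStrip2, pvStrip2N, PySem.Int.mod_natCast, PySem.Int.floordiv_natCast,
      Nat.cast_eq_zero]
    split_ifs with h
    · exact ih (x / q)
    · rfl

theorem pvFactLoop_lift : ∀ (fuel : Nat) (fs : List Nat) (x q : Nat),
    pvFactLoop fuel (fs.map (Int.ofNat)) (↑x) (↑q)
      = ((pvFactLoopN fuel fs x q).1.map (Int.ofNat), (↑(pvFactLoopN fuel fs x q).2 : Int)) := by
  intro fuel
  induction fuel with
  | zero => intro fs x q; rfl
  | succ f ih =>
    intro fs x q
    simp only [pvFactLoop, pvFactLoopN, PySem.Int.mod_natCast, Nat.cast_eq_zero]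
    by_cases h1 : q * q ≤ x
    · rw [if_pos (show ((↑q : Int) * ↑q ≤ ↑x) by exact_mod_cast h1), if_pos h1]
      split_ifs with h2
      · rw [show ((↑x : Int).toNat) = x from Int.toNat_natCast x, pvStrip2_lift,
          show (fs.map Int.ofNat ++ [(↑q : Int)]) = ((fs ++ [q]).map Int.ofNat) by simp,
          show ((↑q : Int) + 1) = ((↑(q + 1) : Nat) : Int) by push_cast; ring]
        exact ih _ _ _
      · rw [show ((↑q : Int) + 1) = ((↑(q + 1) : Nat) : Int) by push_cast; ring]
        exact ih _ _ _
    · rw [if_neg (show ¬((↑q : Int) * ↑q ≤ ↑x) by exact_mod_cast h1), if_neg h1]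

theorem pvRedIn_lift (m q : Nat) : ∀ (fuel : Nat) (e : Nat),
    pvRedIn (↑m) (↑q) fuel (↑e) = (↑(pvRedInN m q fuel e) : Int) := by
  intro fuel
  induction fuel with
  | zero => intro e; rfl
  | succ f ih =>
    intro e
    simp only [pvRedIn, pvRedInN, PySem.Int.mod_natCast, PySem.Int.floordiv_natCast,
      Int.toNat_natCast, Nat.cast_eq_zero]
    rw [show ((2 : Int) ^ (e / q)) = ((↑((2:Nat) ^ (e / q)) : Nat) : Int) by push_cast; ring,
      PySem.Int.mod_natCast]
    by_cases h : e % q = 0 ∧ 2 ^ (e / q) % m = 1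
    · rw [if_pos (by exact_mod_cast h), if_pos h]; exact ih _
    · rw [if_neg (by exact_mod_cast h), if_neg h]

theorem pvFold_lift (M : Nat) : ∀ (l : List Nat) (e : Nat),
    (l.map Int.ofNat).foldl (fun e q => pvRedIn (↑M) q e.toNat e) (↑e)
      = (↑(l.foldl (fun e q => pvRedInN M q e e) e) : Int) := by
  intro l
  induction l with
  | nil => intro e; rfl
  | cons q l ih =>
    intro e
    simp only [List.map_cons, List.foldl_cons, Int.toNat_natCast]
    rw [show (Int.ofNat q) = ((q : Nat) : Int) from rfl, pvRedIn_lift]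
    exact ih _

theorem pvAlt_lift (n : Int) (M : Nat) (hM : (↑M : Int) = n - 1) :
    reinitializePermutation_alt n = ↑(pvAltN M) := by
  have h1 : reinitializePermutation_alt n =
      (let m := (↑M : Int)
       let t := pvPhiLoop (m.toNat + 1) 1 m 2
       let phi := if 1 < t.2 then t.1 * (t.2 - 1) else t.1
       let f := pvFactLoop (phi.toNat + 1) [] phi 2
       let primes := if 1 < f.2 then f.1 ++ [f.2] else f.1
       primes.foldl (fun e q => pvRedIn m q e.toNat e) phi) := by
    unfold reinitializePermutation_alt
    rw [hM]
  rw [h1]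
  have hphiL : pvPhiLoop ((↑M : Int).toNat + 1) 1 (↑M) 2
      = ((↑(pvPhiLoopN (M + 1) 1 M 2).1 : Int), (↑(pvPhiLoopN (M + 1) 1 M 2).2 : Int)) := by
    rw [Int.toNat_natCast]
    exact_mod_cast pvPhiLoop_lift (M + 1) 1 M 2
  have hphi : (if (1 : Int) < (↑(pvPhiLoopN (M + 1) 1 M 2).2 : Int)
      then (↑(pvPhiLoopN (M + 1) 1 M 2).1 : Int) * ((↑(pvPhiLoopN (M + 1) 1 M 2).2 : Int) - 1)
      else (↑(pvPhiLoopN (M + 1) 1 M 2).1 : Int)) = ↑(pvPhiN M) := by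
    unfold pvPhiN
    by_cases h : 1 < (pvPhiLoopN (M + 1) 1 M 2).2
    · rw [if_pos (by exact_mod_cast h), if_pos h]
      rw [Nat.cast_mul, Nat.cast_sub (Nat.one_le_of_lt h), Nat.cast_one]
    · rw [if_neg (by exact_mod_cast h), if_neg h]
  have hfactL : pvFactLoop ((↑(pvPhiN M) : Int).toNat + 1) [] (↑(pvPhiN M)) 2
      = ((pvFactLoopN (pvPhiN M + 1) [] (pvPhiN M) 2).1.map Int.ofNat,
         (↑(pvFactLoopN (pvPhiN M + 1) [] (pvPhiN M) 2).2 : Int)) := by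
    rw [Int.toNat_natCast]
    have := pvFactLoop_lift (pvPhiN M + 1) [] (pvPhiN M) 2
    simpa using this
  have hprimes : (if (1 : Int) < (↑(pvFactLoopN (pvPhiN M + 1) [] (pvPhiN M) 2).2 : Int)
      then (pvFactLoopN (pvPhiN M + 1) [] (pvPhiN M) 2).1.map Int.ofNat
            ++ [(↑(pvFactLoopN (pvPhiN M + 1) [] (pvPhiN M) 2).2 : Int)]
      else (pvFactLoopN (pvPhiN M + 1) [] (pvPhiN M) 2).1.map Int.ofNat)
      = (pvPrimesN (pvPhiN M)).map Int.ofNat := by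
    unfold pvPrimesN
    by_cases h : 1 < (pvFactLoopN (pvPhiN M + 1) [] (pvPhiN M) 2).2
    · rw [if_pos (by exact_mod_cast h), if_pos h]
      simp
    · rw [if_neg (by exact_mod_cast h), if_neg h]
  show (let t := pvPhiLoop ((↑M : Int).toNat + 1) 1 (↑M) 2
        let phi := if 1 < t.2 then t.1 * (t.2 - 1) else t.1
        let f := pvFactLoop (phi.toNat + 1) [] phi 2
        let primes := if 1 < f.2 then f.1 ++ [f.2] else f.1
        primes.foldl (fun e q => pvRedIn (↑M) q e.toNat e) phi) = ↑(pvAltN M)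
  rw [show (let t := pvPhiLoop ((↑M : Int).toNat + 1) 1 (↑M) 2
        let phi := if 1 < t.2 then t.1 * (t.2 - 1) else t.1
        let f := pvFactLoop (phi.toNat + 1) [] phi 2
        let primes := if 1 < f.2 then f.1 ++ [f.2] else f.1
        primes.foldl (fun e q => pvRedIn (↑M) q e.toNat e) phi)
      = (let phi := (↑(pvPhiN M) : Int)
        let f := pvFactLoop (phi.toNat + 1) [] phi 2
        let primes := if 1 < f.2 then f.1 ++ [f.2] else f.1
        primes.foldl (fun e q => pvRedIn (↑M) q e.toNat e) phi) by
      rw [hphiL]; simp only []; rw [hphi]]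
  simp only []
  rw [hfactL]
  simp only []
  rw [hprimes, pvFold_lift]
  rfl

-- ---- trial-division facts ----
theorem pvStripN_spec (p : Nat) (hp : 2 ≤ p) : ∀ (fuel r pe : Nat), 1 ≤ r → r ≤ fuel →
    ∃ k, pvStripN p fuel r pe = (r / p ^ k, pe * p ^ k) ∧ p ^ k ∣ r ∧ ¬ p ∣ r / p ^ k := by
  intro fuel
  induction fuel with
  | zero => intro r pe h1 h2; omega
  | succ f ih =>
    intro r pe h1 h2
    by_cases h : r % p = 0
    · have hdvd : p ∣ r := Nat.dvd_of_mod_eq_zero h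
      have hrp1 : 1 ≤ r / p := (Nat.one_le_div_iff (by omega)).mpr (Nat.le_of_dvd (by omega) hdvd)
      have hrpf : r / p ≤ f := by
        have := Nat.div_lt_self (by omega : 0 < r) (by omega : 1 < p)
        omega
      obtain ⟨k, hk1, hk2, hk3⟩ := ih (r / p) (pe * p) hrp1 hrpf
      refine ⟨k + 1, ?_, ?_, ?_⟩
      · rw [pvStripN, if_pos h, hk1]
        have hdiv : r / p / p ^ k = r / p ^ (k + 1) := by
          rw [Nat.div_div_eq_div_mul, pow_succ']
        have hpe : pe * p * p ^ k = pe * p ^ (k + 1) := by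
          rw [pow_succ']; ring
        rw [hdiv, hpe]
      · rw [pow_succ']
        exact (Nat.dvd_div_iff_mul_dvd hdvd).mp hk2
      · rw [show r / p ^ (k + 1) = r / p / p ^ k by rw [Nat.div_div_eq_div_mul, pow_succ']]
        exact hk3
    · refine ⟨0, ?_, ?_, ?_⟩
      · rw [pvStripN, if_neg h, pow_zero, Nat.div_one, Nat.mul_one]
      · simpa using Nat.one_dvd r
      · rw [pow_zero, Nat.div_one]
        exact fun hc => h (Nat.mod_eq_zero_of_dvd hc)

theorem pvStrip2N_spec (q : Nat) (hq : 2 ≤ q) : ∀ (fuel x : Nat), 1 ≤ x → x ≤ fuel →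
    ∃ k, pvStrip2N q fuel x = x / q ^ k ∧ q ^ k ∣ x ∧ ¬ q ∣ x / q ^ k := by
  intro fuel
  induction fuel with
  | zero => intro x h1 h2; omega
  | succ f ih =>
    intro x h1 h2
    by_cases h : x % q = 0
    · have hdvd : q ∣ x := Nat.dvd_of_mod_eq_zero h
      have hx1 : 1 ≤ x / q := (Nat.one_le_div_iff (by omega)).mpr (Nat.le_of_dvd (by omega) hdvd)
      have hxf : x / q ≤ f := by
        have := Nat.div_lt_self (by omega : 0 < x) (by omega : 1 < q)
        omega
      obtain ⟨k, hk1, hk2, hk3⟩ := ih (x / q) hx1 hxf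
      refine ⟨k + 1, ?_, ?_, ?_⟩
      · rw [pvStrip2N, if_pos h, hk1, Nat.div_div_eq_div_mul, pow_succ']
      · rw [pow_succ']
        exact (Nat.dvd_div_iff_mul_dvd hdvd).mp hk2
      · rw [show x / q ^ (k + 1) = x / q / q ^ k by rw [Nat.div_div_eq_div_mul, pow_succ']]
        exact hk3
    · refine ⟨0, ?_, ?_, ?_⟩
      · rw [pvStrip2N, if_neg h, pow_zero, Nat.div_one]
      · simpa using Nat.one_dvd x
      · rw [pow_zero, Nat.div_one]
        exact fun hc => h (Nat.mod_eq_zero_of_dvd hc)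

theorem prime_of_min_dvd (p r : Nat) (hp : 2 ≤ p) (hd : p ∣ r)
    (hmin : ∀ q, q.Prime → q ∣ r → p ≤ q) : p.Prime := by
  have hq : p.minFac.Prime := Nat.minFac_prime (by omega)
  have h1 : p ≤ p.minFac := hmin _ hq (dvd_trans p.minFac_dvd hd)
  have h2 : p.minFac ≤ p := Nat.minFac_le (by omega)
  exact Nat.prime_def_minFac.mpr ⟨hp, by omega⟩

theorem prime_of_no_small_factor (r p : Nat) (h2 : 2 ≤ r) (hlt : r < p * p)
    (hmin : ∀ q, q.Prime → q ∣ r → p ≤ q) : r.Prime := by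
  by_contra hnp
  have hq : r.minFac.Prime := Nat.minFac_prime (by omega)
  have h1 : p ≤ r.minFac := hmin _ hq r.minFac_dvd
  have h3 : r.minFac ^ 2 ≤ r := Nat.minFac_sq_le_self (by omega) hnp
  have : p * p ≤ r.minFac * r.minFac := Nat.mul_le_mul h1 h1
  rw [pow_two] at h3
  omega

theorem coprime_of_split (s r p : Nat) (hs0 : s ≠ 0)
    (hs : ∀ q, q.Prime → q ∣ s → q < p) (hr : ∀ q, q.Prime → q ∣ r → p ≤ q) :
    Nat.Coprime s r := by
  by_contra hg
  have hg0 : Nat.gcd s r ≠ 0 := fun hc => hs0 (Nat.eq_zero_of_gcd_eq_zero_left hc)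
  have hq : (Nat.gcd s r).minFac.Prime := Nat.minFac_prime hg
  have h1 := hs _ hq (dvd_trans (Nat.minFac_dvd _) (Nat.gcd_dvd_left s r))
  have h2 := hr _ hq (dvd_trans (Nat.minFac_dvd _) (Nat.gcd_dvd_right s r))
  omega

theorem phiExit (m s r phi p : Nat) (hm : 1 ≤ m) (hr : 1 ≤ r) (hsr : s * r = m)
    (hphi : phi = Nat.totient s) (hs : ∀ q, q.Prime → q ∣ s → q < p)
    (hrq : ∀ q, q.Prime → q ∣ r → p ≤ q) (hlt : r < p * p) :
    (if 1 < r then phi * (r - 1) else phi) = Nat.totient m := by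
  have hs0 : s ≠ 0 := by
    intro hc
    rw [hc, Nat.zero_mul] at hsr
    omega
  by_cases h1 : 1 < r
  · have hrp : r.Prime := prime_of_no_small_factor r p h1 hlt hrq
    have hco : Nat.Coprime s r := coprime_of_split s r p hs0 hs hrq
    rw [if_pos h1, ← hsr, Nat.totient_mul hco, Nat.totient_prime hrp, hphi]
  · have hr1 : r = 1 := by omega
    rw [if_neg h1, hphi, ← hsr, hr1, Nat.mul_one]

theorem pvPhiLoopN_totient (m : Nat) (hm : 1 ≤ m) : ∀ (fuel p phi r s : Nat),
    2 ≤ p → 1 ≤ r → s * r = m → phi = Nat.totient s →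
    (∀ q, q.Prime → q ∣ s → q < p) → (∀ q, q.Prime → q ∣ r → p ≤ q) →
    m + 2 ≤ fuel + p →
    (if 1 < (pvPhiLoopN fuel phi r p).2
     then (pvPhiLoopN fuel phi r p).1 * ((pvPhiLoopN fuel phi r p).2 - 1)
     else (pvPhiLoopN fuel phi r p).1) = Nat.totient m := by
  intro fuel
  induction fuel with
  | zero =>
    intro p phi r s hp hr hsr hphi hsmall hbig hfuel
    have hrm : r ≤ m := Nat.le_of_dvd (by omega) ⟨s, by rw [← hsr]; ring⟩
    have hlt : r < p * p := by nlinarith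
    simpa [pvPhiLoopN] using phiExit m s r phi p hm hr hsr hphi hsmall hbig hlt
  | succ f ih =>
    intro p phi r s hp hr hsr hphi hsmall hbig hfuel
    by_cases hc : p * p ≤ r
    · by_cases hd : r % p = 0
      · have hpdvd : p ∣ r := Nat.dvd_of_mod_eq_zero hd
        have hpprime : p.Prime := prime_of_min_dvd p r hp hpdvd hbig
        obtain ⟨k, hk1, hk2, hk3⟩ := pvStripN_spec p hp r r 1 hr le_rfl
        have hk0 : 0 < k := by
          rcases Nat.eq_zero_or_pos k with h0 | h0
          · rw [h0, pow_zero, Nat.div_one] at hk3; exact absurd hpdvd hk3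
          · exact h0
        have hstep : pvPhiLoopN (f + 1) phi r p
            = pvPhiLoopN f (phi * (1 * p ^ k - 1 * p ^ k / p)) (r / p ^ k) (p + 1) := by
          rw [pvPhiLoopN, if_pos hc, if_pos hd]
          simp only [hk1]
        have hpe : 1 * p ^ k = p ^ k := Nat.one_mul _
        have htot : p ^ k - p ^ k / p = (p ^ k).totient := by
          obtain ⟨j, rfl⟩ : ∃ j, k = j + 1 := ⟨k - 1, by omega⟩
          rw [Nat.totient_prime_pow hpprime (by omega)]
          simp only [Nat.add_sub_cancel]
          rw [pow_succ, Nat.mul_div_cancel _ (by omega : 0 < p), Nat.mul_sub, Nat.mul_one]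
        have hr' : 1 ≤ r / p ^ k := (Nat.one_le_div_iff (Nat.pos_of_ne_zero (by positivity))).mpr
          (Nat.le_of_dvd (by omega) hk2)
        have hps : ¬ p ∣ s := fun hps => absurd (hsmall p hpprime hps) (by omega)
        have hcos : Nat.Coprime s (p ^ k) :=
          Nat.Coprime.pow_right k (Nat.Coprime.symm (hpprime.coprime_iff_not_dvd.mpr hps))
        have hsr' : (s * p ^ k) * (r / p ^ k) = m := by
          rw [Nat.mul_assoc, Nat.mul_div_cancel' hk2, hsr]
        have hphi' : phi * (p ^ k - p ^ k / p) = (s * p ^ k).totient := by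
          rw [Nat.totient_mul hcos, htot, hphi]
        rw [hstep, hpe]
        apply ih (p + 1) _ _ (s * p ^ k) (by omega) hr' hsr' hphi'
        · intro q hq hqd
          rcases (Nat.Prime.dvd_mul hq).mp hqd with h | h
          · have := hsmall q hq h; omega
          · have : q = p := (Nat.prime_dvd_prime_iff_eq hq hpprime).mp (hq.dvd_of_dvd_pow h)
            omega
        · intro q hq hqd
          have hqr : q ∣ r := dvd_trans hqd ⟨p ^ k, (Nat.div_mul_cancel hk2).symm⟩
          have := hbig q hq hqr
          have hqp : q ≠ p := by
            intro hc2
            rw [hc2] at hqd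
            exact hk3 hqd
          omega
        · omega
      · have hstep : pvPhiLoopN (f + 1) phi r p = pvPhiLoopN f phi r (p + 1) := by
          rw [pvPhiLoopN, if_pos hc, if_neg hd]
        rw [hstep]
        apply ih (p + 1) phi r s (by omega) hr hsr hphi
          (fun q hq hqd => by have := hsmall q hq hqd; omega) _ (by omega)
        intro q hq hqd
        have := hbig q hq hqd
        have hqp : q ≠ p := by
          intro hc2
          rw [hc2] at hqd
          exact hd (Nat.mod_eq_zero_of_dvd hqd)
        omega
    · have hstep : pvPhiLoopN (f + 1) phi r p = (phi, r) := by
        rw [pvPhiLoopN, if_neg hc]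
      rw [hstep]
      exact phiExit m s r phi p hm hr hsr hphi hsmall hbig (by omega)

theorem pvPhiN_totient (m : Nat) (hm : 1 ≤ m) : pvPhiN m = Nat.totient m := by
  have := pvPhiLoopN_totient m hm (m + 1) 2 1 m 1 (by omega) hm (Nat.one_mul m)
    (Nat.totient_one.symm)
    (fun q hq hqd => by have := Nat.le_of_dvd Nat.one_pos hqd; have := hq.two_le; omega)
    (fun q hq _ => hq.two_le) (by omega)
  unfold pvPhiN
  exact this

theorem factExit (fs : List Nat) (x q : Nat) (hq : 2 ≤ q) (hx : 1 ≤ x)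
    (hfs : ∀ a ∈ fs, 2 ≤ a) (hbig : ∀ r, r.Prime → r ∣ x → q ≤ r) (hlt : x < q * q) :
    (∀ a ∈ (if 1 < x then fs ++ [x] else fs), 2 ≤ a) ∧
    (∀ a ∈ fs, a ∈ (if 1 < x then fs ++ [x] else fs)) ∧
    (∀ r, r.Prime → r ∣ x → r ∈ (if 1 < x then fs ++ [x] else fs)) := by
  by_cases h1 : 1 < x
  · have hxp : x.Prime := prime_of_no_small_factor x q h1 hlt hbig
    rw [if_pos h1]
    refine ⟨?_, ?_, ?_⟩
    · intro a ha
      rcases List.mem_append.mp ha with h | h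
      · exact hfs a h
      · simp at h; omega
    · intro a ha; exact List.mem_append.mpr (Or.inl ha)
    · intro r hr hrd
      have : r = x := (Nat.prime_dvd_prime_iff_eq hr hxp).mp hrd
      subst this
      exact List.mem_append.mpr (Or.inr (by simp))
  · have hx1 : x = 1 := by omega
    rw [if_neg h1]
    refine ⟨hfs, fun a ha => ha, ?_⟩
    intro r hr hrd
    rw [hx1] at hrd
    have := Nat.le_of_dvd Nat.one_pos hrd
    have := hr.two_le
    omega

theorem pvFactLoopN_spec : ∀ (fuel q x : Nat) (fs : List Nat), 2 ≤ q → 1 ≤ x →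
    (∀ a ∈ fs, 2 ≤ a) →
    (∀ r, r.Prime → r ∣ x → q ≤ r) → x + 2 ≤ fuel + q →
    (∀ a ∈ (if 1 < (pvFactLoopN fuel fs x q).2
             then (pvFactLoopN fuel fs x q).1 ++ [(pvFactLoopN fuel fs x q).2]
             else (pvFactLoopN fuel fs x q).1), 2 ≤ a) ∧
    (∀ a ∈ fs, a ∈ (if 1 < (pvFactLoopN fuel fs x q).2
             then (pvFactLoopN fuel fs x q).1 ++ [(pvFactLoopN fuel fs x q).2]
             else (pvFactLoopN fuel fs x q).1)) ∧
    (∀ r, r.Prime → r ∣ x → r ∈ (if 1 < (pvFactLoopN fuel fs x q).2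
             then (pvFactLoopN fuel fs x q).1 ++ [(pvFactLoopN fuel fs x q).2]
             else (pvFactLoopN fuel fs x q).1)) := by
  intro fuel
  induction fuel with
  | zero =>
    intro q x fs hq hx hfs hbig hfuel
    have hlt : x < q * q := by nlinarith
    simpa [pvFactLoopN] using factExit fs x q hq hx hfs hbig hlt
  | succ f ih =>
    intro q x fs hq hx hfs hbig hfuel
    by_cases hc : q * q ≤ x
    · by_cases hd : x % q = 0
      · have hqdvd : q ∣ x := Nat.dvd_of_mod_eq_zero hd
        have hqprime : q.Prime := prime_of_min_dvd q x hq hqdvd hbig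
        obtain ⟨k, hk1, hk2, hk3⟩ := pvStrip2N_spec q hq x x hx le_rfl
        have hk0 : 0 < k := by
          rcases Nat.eq_zero_or_pos k with h0 | h0
          · rw [h0, pow_zero, Nat.div_one] at hk3; exact absurd hqdvd hk3
          · exact h0
        have hstep : pvFactLoopN (f + 1) fs x q = pvFactLoopN f (fs ++ [q]) (x / q ^ k) (q + 1) := by
          rw [pvFactLoopN, if_pos hc, if_pos hd, hk1]
        have hx' : 1 ≤ x / q ^ k := (Nat.one_le_div_iff (Nat.pos_of_ne_zero (by positivity))).mpr
          (Nat.le_of_dvd (by omega) hk2)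
        have hres := ih (q + 1) (x / q ^ k) (fs ++ [q]) (by omega) hx'
          (by
            intro a ha
            rcases List.mem_append.mp ha with h | h
            · exact hfs a h
            · simp at h; omega)
          (by
            intro r hr hrd
            have hrx : r ∣ x := dvd_trans hrd ⟨q ^ k, (Nat.div_mul_cancel hk2).symm⟩
            have := hbig r hr hrx
            have hrq : r ≠ q := by
              intro hc2
              rw [hc2] at hrd
              exact hk3 hrd
            omega)
          (by
            have : x / q ^ k ≤ x := Nat.div_le_self _ _
            omega)
        rw [hstep]
        refine ⟨hres.1, ?_, ?_⟩
        · intro a ha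
          exact hres.2.1 a (List.mem_append.mpr (Or.inl ha))
        · intro r hr hrd
          have hxeq : x = q ^ k * (x / q ^ k) := (Nat.mul_div_cancel' hk2).symm
          rw [hxeq] at hrd
          rcases (Nat.Prime.dvd_mul hr).mp hrd with h | h
          · have : r = q := (Nat.prime_dvd_prime_iff_eq hr hqprime).mp (hr.dvd_of_dvd_pow h)
            subst this
            exact hres.2.1 r (List.mem_append.mpr (Or.inr (by simp)))
          · exact hres.2.2 r hr h
      · have hstep : pvFactLoopN (f + 1) fs x q = pvFactLoopN f fs x (q + 1) := by
          rw [pvFactLoopN, if_pos hc, if_neg hd]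
        rw [hstep]
        apply ih (q + 1) x fs (by omega) hx hfs
        · intro r hr hrd
          have := hbig r hr hrd
          have hrq : r ≠ q := by
            intro hc2
            rw [hc2] at hrd
            exact hd (Nat.mod_eq_zero_of_dvd hrd)
          omega
        · omega
    · have hstep : pvFactLoopN (f + 1) fs x q = (fs, x) := by
        rw [pvFactLoopN, if_neg hc]
      rw [hstep]
      exact factExit fs x q hq hx hfs hbig (by omega)

theorem pvPrimesN_spec (x : Nat) (hx : 1 ≤ x) :
    (∀ a ∈ pvPrimesN x, 2 ≤ a) ∧ (∀ r, r.Prime → r ∣ x → r ∈ pvPrimesN x) := by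
  have h := pvFactLoopN_spec (x + 1) 2 x [] (by omega) hx (by simp)
    (fun r hr _ => hr.two_le) (by omega)
  exact ⟨h.1, h.2.2⟩

-- ---- order-of-2 facts (d = least positive exponent with 2^d % M = 1) ----
theorem pow_eq_one_of_ord_dvd (M d : Nat) (hM : 2 ≤ M) (hd1 : 2 ^ d % M = 1)
    (e : Nat) (h : d ∣ e) : 2 ^ e % M = 1 := by
  obtain ⟨t, rfl⟩ := h
  have h1 : (2 ^ d) ≡ 1 [MOD M] := by
    unfold Nat.ModEq
    rw [hd1, Nat.mod_eq_of_lt (by omega)]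
  have h2 : (2 ^ d) ^ t ≡ 1 ^ t [MOD M] := h1.pow t
  rw [one_pow] at h2
  rw [pow_mul]
  unfold Nat.ModEq at h2
  rw [h2, Nat.mod_eq_of_lt (by omega)]

theorem ord_dvd_of_pow_eq_one (M d : Nat) (hM : 2 ≤ M) (hd0 : 0 < d) (hd1 : 2 ^ d % M = 1)
    (hdmin : ∀ i, 0 < i → i < d → 2 ^ i % M ≠ 1)
    (e : Nat) (h : 2 ^ e % M = 1) : d ∣ e := by
  have hsplit : d * (e / d) + e % d = e := Nat.div_add_mod e d
  have hr : 2 ^ (e % d) % M = 1 := by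
    have h1 : (2 ^ d) ^ (e / d) ≡ 1 [MOD M] := by
      have : (2 ^ d) ≡ 1 [MOD M] := by
        unfold Nat.ModEq
        rw [hd1, Nat.mod_eq_of_lt (by omega)]
      simpa using this.pow (e / d)
    have h2 : (2 ^ d) ^ (e / d) * 2 ^ (e % d) ≡ 1 * 2 ^ (e % d) [MOD M] :=
      h1.mul_right _
    rw [one_mul, ← pow_mul, ← pow_add, hsplit] at h2
    unfold Nat.ModEq at h2
    rw [← h2, h]
  rcases Nat.eq_zero_or_pos (e % d) with h0 | h0
  · exact Nat.dvd_of_mod_eq_zero h0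
  · exact absurd hr (hdmin _ h0 (Nat.mod_lt e hd0))

theorem pvRedInN_spec (M d q : Nat) (hM : 2 ≤ M) (hd0 : 0 < d) (hd1 : 2 ^ d % M = 1)
    (hdmin : ∀ i, 0 < i → i < d → 2 ^ i % M ≠ 1) (hq : 2 ≤ q) :
    ∀ (fuel e : Nat), 1 ≤ e → d ∣ e → e ≤ fuel →
    (pvRedInN M q fuel e) ∣ e ∧ d ∣ (pvRedInN M q fuel e) ∧ 1 ≤ (pvRedInN M q fuel e) ∧
      ¬ (q ∣ (pvRedInN M q fuel e) ∧ 2 ^ ((pvRedInN M q fuel e) / q) % M = 1) := by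
  intro fuel
  induction fuel with
  | zero => intro e h1 _ h3; omega
  | succ f ih =>
    intro e h1 hde h3
    by_cases hc : e % q = 0 ∧ 2 ^ (e / q) % M = 1
    · have hqdvd : q ∣ e := Nat.dvd_of_mod_eq_zero hc.1
      have hde' : d ∣ e / q := ord_dvd_of_pow_eq_one M d hM hd0 hd1 hdmin _ hc.2
      have he' : 1 ≤ e / q := (Nat.one_le_div_iff (by omega)).mpr (Nat.le_of_dvd (by omega) hqdvd)
      have hf : e / q ≤ f := by
        have := Nat.div_lt_self (by omega : 0 < e) (by omega : 1 < q)
        omega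
      have hstep : pvRedInN M q (f + 1) e = pvRedInN M q f (e / q) := by
        rw [pvRedInN, if_pos hc]
      obtain ⟨ha, hb, hcc, hd'⟩ := ih (e / q) he' hde' hf
      rw [hstep]
      exact ⟨dvd_trans ha ⟨q, (Nat.div_mul_cancel hqdvd).symm⟩, hb, hcc, hd'⟩
    · have hstep : pvRedInN M q (f + 1) e = e := by
        rw [pvRedInN, if_neg hc]
      rw [hstep]
      refine ⟨dvd_refl e, hde, h1, fun hcon => hc ⟨Nat.mod_eq_zero_of_dvd hcon.1, hcon.2⟩⟩

theorem div_dvd_div_of_dvd (d e1 e : Nat) (h1 : d ∣ e1) (h2 : e1 ∣ e) : e1 / d ∣ e / d := by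
  obtain ⟨c, rfl⟩ := h2
  refine ⟨c, ?_⟩
  rw [Nat.mul_comm e1 c, Nat.mul_div_assoc c h1]
  ring

theorem redFold_spec (M d : Nat) (hM : 2 ≤ M) (hd0 : 0 < d) (hd1 : 2 ^ d % M = 1)
    (hdmin : ∀ i, 0 < i → i < d → 2 ^ i % M ≠ 1) :
    ∀ (l : List Nat) (e : Nat), 1 ≤ e → d ∣ e → (∀ a ∈ l, 2 ≤ a) →
    (∀ q, q.Prime → q ∣ e / d → q ∈ l) →
    l.foldl (fun e q => pvRedInN M q e e) e = d := by
  intro l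
  induction l with
  | nil =>
    intro e h1 hde _ hmem
    simp only [List.foldl_nil]
    by_contra hne
    have hdle : d ≤ e := Nat.le_of_dvd (by omega) hde
    have hdlt : d < e := by omega
    obtain ⟨t, rfl⟩ := hde
    have ht2 : 2 ≤ t := by
      rcases t with _ | _ | t
      · omega
      · omega
      · omega
    have htd : t = d * t / d := by rw [Nat.mul_div_cancel_left _ hd0]
    have hq : (t.minFac).Prime := Nat.minFac_prime (by omega)
    have : t.minFac ∈ ([] : List Nat) := hmem _ hq (htd ▸ t.minFac_dvd)
    simp at this
  | cons q l ihl =>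
    intro e h1 hde hmem2 hmem
    have hq2 : 2 ≤ q := hmem2 q (by simp)
    obtain ⟨ha, hb, hcc, hnd⟩ := pvRedInN_spec M d q hM hd0 hd1 hdmin hq2 e e h1 hde le_rfl
    simp only [List.foldl_cons]
    apply ihl _ hcc hb (fun a hx => hmem2 a (by simp [hx]))
    intro r hr hrd
    set e1 := pvRedInN M q e e with he1
    have hrd' : r ∣ e / d := dvd_trans hrd (div_dvd_div_of_dvd d e1 e hb ha)
    have hrmem : r ∈ q :: l := hmem r hr hrd'
    rcases List.mem_cons.mp hrmem with hcase | hcase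
    · exfalso
      subst hcase
      have hre1 : r ∣ e1 := dvd_trans hrd ⟨d, by rw [Nat.mul_comm, Nat.mul_div_cancel' hb]⟩
      have hde1r : d ∣ e1 / r := by
        obtain ⟨t, ht⟩ := hb
        refine ⟨t / r, ?_⟩
        rw [ht] at hrd ⊢
        rw [Nat.mul_div_cancel_left _ hd0] at hrd
        rw [Nat.mul_div_assoc d hrd]
      exact hnd ⟨hre1, pow_eq_one_of_ord_dvd M d hM hd1 _ hde1r⟩
    · exact hcase

-- ---- A-side: the tracked position after j steps is 2^j % M ----
theorem pow_mod_pos (M : Nat) (hM : 3 ≤ M) (hodd : M % 2 = 1) (j : Nat) : 1 ≤ 2 ^ j % M := by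
  rcases Nat.eq_zero_or_pos (2 ^ j % M) with h0 | h0
  · exfalso
    have hdvd : M ∣ 2 ^ j := Nat.dvd_of_mod_eq_zero h0
    have hco : Nat.Coprime M 2 := Nat.coprime_comm.mp (Nat.coprime_two_left.mpr (Nat.odd_iff.mpr hodd))
    have := Nat.Coprime.eq_one_of_dvd (hco.pow_right j) hdvd
    omega
  · exact h0

theorem pvAStep (M : Nat) (hM : 3 ≤ M) (hodd : M % 2 = 1) (pos : Nat)
    (h1 : 1 ≤ pos) (h2 : pos ≤ M - 1) :
    (if (↑pos : Int) < PySem.Int.floordiv ((↑M : Int) + 1) 2 then 2 * (↑pos : Int)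
     else 2 * (↑pos : Int) - ((↑M : Int) + 1) + 1)
      = (↑(2 * pos % M) : Int) := by
  rw [PySem.Int.floordiv_eq_ediv_of_pos (by omega)]
  by_cases h : 2 * pos < M
  · rw [if_pos (by omega), Nat.mod_eq_of_lt h]
    push_cast
    ring
  · have h2M : 2 * pos ≠ M := by omega
    have hge : M + 1 ≤ 2 * pos := by omega
    have hlt2 : 2 * pos - M < M := by omega
    rw [if_neg (by omega), Nat.mod_eq_sub_mod (by omega), Nat.mod_eq_of_lt hlt2,
      Nat.cast_sub (by omega)]
    push_cast
    ring

theorem pvALoop_ord (M d : Nat) (hM : 3 ≤ M) (hodd : M % 2 = 1) (hd0 : 0 < d)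
    (hd1 : 2 ^ d % M = 1) (hdmin : ∀ i, 0 < i → i < d → 2 ^ i % M ≠ 1) :
    ∀ (fuel j : Nat), (∀ i, 1 ≤ i → i ≤ j → 2 ^ i % M ≠ 1) → d ≤ j + fuel →
    pvALoop ((↑M : Int) + 1) fuel (↑(2 ^ j % M)) (↑j) = (↑d : Int) := by
  intro fuel
  induction fuel with
  | zero =>
    intro j hj hdj
    exfalso
    exact hj d hd0 (by omega) hd1
  | succ f ih =>
    intro j hj hdj
    have hpos1 : 1 ≤ 2 ^ j % M := pow_mod_pos M hM hodd j
    have hpos2 : 2 ^ j % M ≤ M - 1 := by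
      have := Nat.mod_lt (2 ^ j) (show 0 < M by omega)
      omega
    have hstep := pvAStep M hM hodd (2 ^ j % M) hpos1 hpos2
    have hnext : 2 * (2 ^ j % M) % M = 2 ^ (j + 1) % M := by
      conv_rhs => rw [pow_succ, Nat.mul_comm (2 ^ j) 2]
      simp [Nat.mul_mod]
    show (let pos' := if (↑(2 ^ j % M) : Int) < PySem.Int.floordiv ((↑M : Int) + 1) 2
            then 2 * (↑(2 ^ j % M) : Int) else 2 * (↑(2 ^ j % M) : Int) - ((↑M : Int) + 1) + 1
          if pos' = 1 then (↑j : Int) + 1 else pvALoop ((↑M : Int) + 1) f pos' ((↑j : Int) + 1)) = ↑d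
    simp only [hstep, hnext]
    by_cases h1 : 2 ^ (j + 1) % M = 1
    · rw [if_pos (by exact_mod_cast congrArg (Nat.cast : Nat → Int) h1)]
      have hdvd : d ∣ j + 1 := ord_dvd_of_pow_eq_one M d (by omega) hd0 hd1 hdmin _ h1
      have hgt : j < d := by
        by_contra hc
        exact hj d hd0 (by omega) hd1
      have : d = j + 1 := by
        have := Nat.le_of_dvd (by omega) hdvd
        omega
      rw [this]
      push_cast
      ring
    · rw [if_neg (by exact_mod_cast fun hc => h1 (by exact_mod_cast hc))]
      rw [show ((↑j : Int) + 1) = (↑(j + 1) : Nat) by push_cast; ring]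
      apply ih (j + 1) _ (by omega)
      intro i hi1 hi2
      rcases Nat.lt_or_ge i (j + 1) with h | h
      · exact hj i hi1 (by omega)
      · have : i = j + 1 := by omega
        rw [this]
        exact h1

-- ---- assembly ----
theorem main_eq (n : Int) (h2 : 2 ≤ n) (he : n % 2 = 0) :
    reinitializePermutation n = reinitializePermutation_alt n := by
  by_cases h4 : 4 ≤ n
  · set M : Nat := (n - 1).toNat with hMdef
    have hMn : (↑M : Int) = n - 1 := Int.toNat_of_nonneg (by omega)
    have hM3 : 3 ≤ M := by omega
    have hModd : M % 2 = 1 := by omega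
    have hco : Nat.Coprime 2 M := Nat.coprime_two_left.mpr (Nat.odd_iff.mpr hModd)
    have hE0 : 0 < Nat.totient M := Nat.totient_pos.mpr (by omega)
    have hEuler : 2 ^ (Nat.totient M) % M = 1 := by
      have h := Nat.ModEq.pow_totient hco
      unfold Nat.ModEq at h
      rw [Nat.mod_eq_of_lt (by omega : (1 : Nat) < M)] at h
      exact h
    have hex : ∃ k, 0 < k ∧ 2 ^ k % M = 1 := ⟨Nat.totient M, hE0, hEuler⟩
    haveI : DecidablePred (fun k => 0 < k ∧ 2 ^ k % M = 1) := fun k => by infer_instance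
    set d := Nat.find hex with hddef
    have hdspec := Nat.find_spec hex
    have hd0 : 0 < d := hdspec.1
    have hd1 : 2 ^ d % M = 1 := hdspec.2
    have hdmin : ∀ i, 0 < i → i < d → 2 ^ i % M ≠ 1 := by
      intro i hi0 hid hic
      exact Nat.find_min hex hid ⟨hi0, hic⟩
    have hdE : d ∣ Nat.totient M := ord_dvd_of_pow_eq_one M d (by omega) hd0 hd1 hdmin _ hEuler
    have hA : reinitializePermutation n = ↑d := by
      show pvALoop n n.toNat 1 0 = (↑d : Int)
      have hloop := pvALoop_ord M d hM3 hModd hd0 hd1 hdmin (M + 1) 0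
        (by intro i hi1 hi2; omega)
        (by
          have hdle : d ≤ Nat.totient M := Nat.le_of_dvd hE0 hdE
          have := Nat.totient_lt M (by omega)
          omega)
      rw [show (2 ^ 0 % M) = 1 by rw [pow_zero, Nat.mod_eq_of_lt (by omega)]] at hloop
      simp only [Nat.cast_one, Nat.cast_zero] at hloop
      rw [show n = (↑M : Int) + 1 by omega, show ((↑M : Int) + 1).toNat = M + 1 by omega]
      exact hloop
    have hB : reinitializePermutation_alt n = ↑d := by
      rw [pvAlt_lift n M hMn]
      congr 1
      unfold pvAltN
      rw [pvPhiN_totient M (by omega)]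
      obtain ⟨hp1, hp2⟩ := pvPrimesN_spec (Nat.totient M) hE0
      apply redFold_spec M d (by omega) hd0 hd1 hdmin _ _ hE0 hdE hp1
      intro q hq hqd
      exact hp2 q hq (dvd_trans hqd ⟨d, (Nat.div_mul_cancel hdE).symm⟩)
    rw [hA, hB]
  · have hn2 : n = 2 := by omega
    subst hn2
    decide

-- ===== VERDICT (by name: the statement is the Claim_ definition above) =====
theorem reinitializePermutation_spec : Claim_equal_reinitializePermutation := by
  intro n _ hpre
  exact main_eq n hpre.1 hpre.2
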